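-- pv_equiv track=rewrite | github.com/kimyj950113/video-encoder | gdrive_design_compare.py | compress_highest_folders
-- ===== SOURCE A (Python) =====
-- from typing import Dict, List, Optional, Tuple, Set, Iterable, Union
--
-- def _norm_rel_folder(folder: str) -> str:
--     # Dropbox relative root가 "."로 들어오는 케이스를 루트로 통일
--     return "" if folder in ("", ".", "./") else folder
--
-- def compress_highest_folders(full_folders: Set[str]) -> List[str]:
--     """
--     최대한 상위 폴더로 압축:
--     어떤 폴더가 후보면, 그 하위 후보는 제거.
--     (루트("")가 후보면, 사실상 전부 삭제 가능이므로 하위는 모두 제거)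
--     """
--     normalized = {_norm_rel_folder(f) for f in full_folders}
--     ordered = sorted(normalized, key=lambda x: (x.count("/"), x))
--
--     kept: List[str] = []
--     for f in ordered:
--         # 이미 kept에 루트("")가 있으면 다른 건 전부 하위로 간주
--         if "" in kept and f != "":
--             continue
--
--         if any(
--             (f == k) or
--             (k != "" and f.startswith(k + "/"))
--             for k in kept
--         ):
--             continue
--         kept.append(f)
--
--     return kept
-- ===== SOURCE B (Python) =====
-- def compress_highest_folders(full_folders):
--     norm = {("" if f in ("", ".", "./") else f) for f in full_folders}
--     if "" in norm:
--         return [""]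
--
--     def dropped(f):
--         # f is shadowed by some candidate iff one of its proper ancestor
--         # prefixes (the part before some "/") is itself in the set.
--         return any(f[i] == "/" and f[:i] in norm for i in range(len(f)))
--
--     return [f for f in sorted(norm, key=lambda x: (x.count("/"), x))
--             if not dropped(f)]
-- ===== Notes on version B (the rewrite author's own statement) =====
-- stated objective: faster
-- what changed: Instead of testing every folder against the whole kept-so-far list (f == k or f.startswith(k + '/') for each kept k), B handles the root '' up front and keeps a folder iff none of its own ancestor prefixes (the part before each '/') is in the normalized set, one hash-set membership test per '/' in the path.
import Mathlib
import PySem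

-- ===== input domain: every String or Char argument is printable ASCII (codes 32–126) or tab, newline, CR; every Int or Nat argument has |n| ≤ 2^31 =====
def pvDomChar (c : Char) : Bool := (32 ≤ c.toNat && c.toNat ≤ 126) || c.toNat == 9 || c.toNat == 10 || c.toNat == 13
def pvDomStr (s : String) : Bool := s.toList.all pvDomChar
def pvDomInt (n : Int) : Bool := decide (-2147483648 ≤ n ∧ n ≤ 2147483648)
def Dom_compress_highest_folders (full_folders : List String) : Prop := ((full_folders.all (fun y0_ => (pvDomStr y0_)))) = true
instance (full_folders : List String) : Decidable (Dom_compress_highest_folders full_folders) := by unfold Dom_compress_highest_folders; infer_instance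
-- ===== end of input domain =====

-- B replaces A's rescan of the kept list for every folder by a direct set-membership
-- test of the folder's own ancestor prefixes (objective: faster).

-- ===== PORT A =====
-- _norm_rel_folder
def pvNorm (f : String) : String := if f == "" || f == "." || f == "./" then "" else f

-- sorted(normalized, key=...) sorts a set, but the key (x.count("/"), x) is injective
-- on distinct strings, so the result does not depend on the set's iteration order (exact).
def compress_highest_folders (full_folders : List String) : List String :=
  let normalized := PySem.Set.ofList (full_folders.map pvNorm)
  let ordered := PySem.List.sorted2 normalized (fun x => PySem.Str.count x "/") (fun x => x)
  ordered.foldl (fun kept f =>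
    if kept.contains "" && f != "" then kept
    else if kept.any (fun k => f == k || (k != "" && PySem.Str.startswith f (k ++ "/"))) then kept
    else kept ++ [f]) []

-- ===== PORT B =====
-- dropped(f) = any(f[i] == "/" and f[:i] in norm for i in range(len(f)));
-- f[i] and f[:i] are ported on code points as getElem? / take — exact since 0 ≤ i < len(f).
def pvHasAncestor (norm : List String) (f : String) : Bool :=
  (List.range f.toList.length).any (fun i =>
    f.toList[i]? == some '/' && norm.contains (String.ofList (f.toList.take i)))

def compress_highest_folders_alt (full_folders : List String) : List String :=
  let norm : List String := PySem.Set.ofList (full_folders.map pvNorm)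
  if norm.contains "" then [""]
  else
    (PySem.List.sorted2 norm (fun x => PySem.Str.count x "/") (fun x => x)).filter
      (fun f => !pvHasAncestor norm f)

-- ===== PRECONDITION & SPEC =====
def Spec_compress_highest_folders (full_folders : List String) (out : List String) : Prop := out = compress_highest_folders_alt full_folders
instance (full_folders : List String) (out : List String) : Decidable (Spec_compress_highest_folders full_folders out) := by unfold Spec_compress_highest_folders; infer_instance

-- ===== CLAIM (what is proved, stated in full; the proofs are below) =====
def Claim_equal_compress_highest_folders : Prop := ∀ (full_folders : List String), Dom_compress_highest_folders full_folders → Spec_compress_highest_folders full_folders (compress_highest_folders full_folders)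

-- ===== LEMMAS AND PROOFS =====

-- proper slash-ancestor: g + "/" is a prefix of f
def pvAnc (g f : String) : Prop := g.toList ++ ['/'] <+: f.toList

-- "no member of S is a proper slash-ancestor of f"
def pvKeepB (S : List String) (f : String) : Bool :=
  S.all (fun g => !(g.toList ++ ['/']).isPrefixOf f.toList)

-- A's loop body, named for the proofs (syntactically the lambda in the port)
def pvAbody : List String → String → List String := fun kept f =>
  if kept.contains "" && f != "" then kept
  else if kept.any (fun k => f == k || (k != "" && PySem.Str.startswith f (k ++ "/"))) then kept
  else kept ++ [f]

lemma pv_slash_toList : ("/" : String).toList = ['/'] := by decide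

lemma pvKeepB_iff (S : List String) (f : String) :
    pvKeepB S f = true ↔ ∀ g ∈ S, ¬ pvAnc g f := by
  simp [pvKeepB, pvAnc, List.all_eq_true, Bool.eq_false_iff,
    List.isPrefixOf_iff_prefix]

lemma pvKeepB_false_iff (S : List String) (f : String) :
    pvKeepB S f = false ↔ ∃ g ∈ S, pvAnc g f := by
  rw [← Bool.not_eq_true, pvKeepB_iff]
  push Not
  simp

lemma pv_startswith_anc (k f : String) :
    PySem.Str.startswith f (k ++ "/") = true ↔ pvAnc k f := by
  rw [PySem.Str.startswith_eq, PySem.Chars.startswith_iff, String.toList_append, pv_slash_toList]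
  exact Iff.rfl

lemma pv_count_go_single (c : Char) :
    ∀ (fuel : Nat) (l : List Char) (acc : Nat), l.length ≤ fuel →
      PySem.Chars.count.go [c] fuel l acc = acc + l.count c := by
  intro fuel
  induction fuel with
  | zero =>
      intro l acc h
      have hl : l = [] := List.eq_nil_of_length_eq_zero (Nat.le_zero.mp h)
      subst hl
      simp [PySem.Chars.count.go]
  | succ n ih =>
      intro l acc h
      cases l with
      | nil => simp [PySem.Chars.count.go]
      | cons x xs =>
          have hstep : PySem.Chars.count.go [c] (n+1) (x :: xs) acc =
              if [c].isPrefixOf (x :: xs) then PySem.Chars.count.go [c] n xs (acc+1)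
              else PySem.Chars.count.go [c] n xs acc := rfl
          rw [hstep]
          by_cases hx : c = x
          · subst hx
            rw [if_pos (by simp)]
            rw [ih xs (acc+1) (Nat.succ_le_succ_iff.mp (by simpa using h))]
            rw [List.count_cons_self]
            omega
          · rw [if_neg (by simp [List.isPrefixOf_iff_prefix, List.cons_prefix_cons]; intro hc; exact hx hc)]
            rw [ih xs acc (Nat.succ_le_succ_iff.mp (by simpa using h))]
            rw [List.count_cons_of_ne (by intro hc; exact hx hc.symm)]

lemma pv_count_single (l : List Char) (c : Char) :
    PySem.Chars.count l [c] = l.count c := by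
  have he : ([c] : List Char).isEmpty = false := by simp
  rw [PySem.Chars.count, he]
  simp [pv_count_go_single c l.length l 0 (le_refl _)]

lemma pv_cnt_eq (f : String) : PySem.Str.count f "/" = f.toList.count '/' := by
  rw [PySem.Str.count_eq, pv_slash_toList, pv_count_single]

lemma pv_anc_len {g f : String} (h : pvAnc g f) : g.toList.length < f.toList.length := by
  obtain ⟨r, hr⟩ := h
  have hlen : f.toList.length = g.toList.length + 1 + r.length := by
    rw [← hr]; simp [List.length_append]; omega
  omega

lemma pv_anc_count {g f : String} (h : pvAnc g f) :
    PySem.Str.count g "/" < PySem.Str.count f "/" := by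
  obtain ⟨r, hr⟩ := h
  rw [pv_cnt_eq, pv_cnt_eq, ← hr]
  simp [List.count_append]

lemma pv_anc_trans {h g f : String} (h1 : pvAnc h g) (h2 : pvAnc g f) : pvAnc h f :=
  List.IsPrefix.trans h1 (List.IsPrefix.trans (List.prefix_append _ _) h2)

lemma pv_anc_ne {g f : String} (h : pvAnc g f) : g ≠ f := by
  intro he
  subst he
  exact absurd (pv_anc_len h) (lt_irrefl _)

lemma pv_exists_min_anc (S : List String) :
    ∀ (n : Nat) (g f : String), g.toList.length ≤ n → g ∈ S → pvAnc g f →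
      ∃ g', g' ∈ S ∧ pvKeepB S g' = true ∧ pvAnc g' f := by
  intro n
  induction n with
  | zero =>
      intro g f hlen hg hanc
      by_cases hk : pvKeepB S g = true
      · exact ⟨g, hg, hk, hanc⟩
      · obtain ⟨h, _, hha⟩ := (pvKeepB_false_iff S g).mp (Bool.eq_false_iff.mpr hk)
        have := pv_anc_len hha
        omega
  | succ n ih =>
      intro g f hlen hg hanc
      by_cases hk : pvKeepB S g = true
      · exact ⟨g, hg, hk, hanc⟩
      · obtain ⟨h, hh, hha⟩ := (pvKeepB_false_iff S g).mp (Bool.eq_false_iff.mpr hk)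
        have hlt := pv_anc_len hha
        exact ih h f (by omega) hh (pv_anc_trans hha hanc)

lemma pv_pairwise_insertBy {α : Type} {R : α → α → Prop} (before : α → α → Bool)
    (h1 : ∀ a b, before a b = true → R a b) (h2 : ∀ a b, before a b = false → R b a)
    (ht : ∀ {a b c}, R a b → R b c → R a c) :
    ∀ (x : α) (acc : List α), acc.Pairwise R → (PySem.List.insertBy before x acc).Pairwise R := by
  intro x acc
  induction acc with
  | nil => intro _; simp [PySem.List.insertBy]
  | cons y ys ih =>
      intro hp
      by_cases hb : before x y = true
      · rw [show PySem.List.insertBy before x (y :: ys) = x :: y :: ys by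
          simp [PySem.List.insertBy, hb]]
        constructor
        · intro z hz
          rcases List.mem_cons.mp hz with hz | hz
          · subst hz; exact h1 _ _ hb
          · exact ht (h1 _ _ hb) (List.rel_of_pairwise_cons hp hz)
        · exact hp
      · rw [show PySem.List.insertBy before x (y :: ys) = y :: PySem.List.insertBy before x ys by
          simp [PySem.List.insertBy, hb]]
        constructor
        · intro z hz
          rcases (PySem.List.mem_insertBy _ _ _ _).mp hz with hz | hz
          · subst hz; exact h2 _ _ (Bool.eq_false_iff.mpr hb)
          · exact List.rel_of_pairwise_cons hp hz
        · exact ih hp.of_cons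

lemma pv_pairwise_foldl_insertBy {α : Type} {R : α → α → Prop} (before : α → α → Bool)
    (h1 : ∀ a b, before a b = true → R a b) (h2 : ∀ a b, before a b = false → R b a)
    (ht : ∀ {a b c}, R a b → R b c → R a c) :
    ∀ (xs acc : List α), acc.Pairwise R →
      (xs.foldl (fun acc x => PySem.List.insertBy before x acc) acc).Pairwise R := by
  intro xs
  induction xs with
  | nil => intro acc h; simpa using h
  | cons x t ih =>
      intro acc h
      exact ih _ (pv_pairwise_insertBy before h1 h2 ht x acc h)

-- the lexicographic sort key is monotone along the sorted list
lemma pv_sorted2_pairwise (S : List String) :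
    (PySem.List.sorted2 S (fun x => PySem.Str.count x "/") (fun x => x)).Pairwise
      (fun a b => PySem.Str.count a "/" < PySem.Str.count b "/" ∨
                  (PySem.Str.count a "/" = PySem.Str.count b "/" ∧ a ≤ b)) := by
  have hdef : PySem.List.sorted2 S (fun x => PySem.Str.count x "/") (fun x => x) =
      S.foldl (fun acc x => PySem.List.insertBy
        (fun a b => decide (PySem.Str.count a "/" < PySem.Str.count b "/") ||
          (!decide (PySem.Str.count b "/" < PySem.Str.count a "/") && decide (a < b))) x acc) [] := by
    simp [PySem.List.sorted2]
  rw [hdef]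
  apply pv_pairwise_foldl_insertBy
  · intro a b h
    simp only [Bool.or_eq_true, Bool.and_eq_true, Bool.not_eq_true', decide_eq_true_eq,
      decide_eq_false_iff_not] at h
    rcases h with h | ⟨hnb, hab⟩
    · exact Or.inl h
    · by_cases hlt : PySem.Str.count a "/" < PySem.Str.count b "/"
      · exact Or.inl hlt
      · exact Or.inr ⟨by omega, le_of_lt hab⟩
  · intro a b h
    simp only [Bool.or_eq_false_iff, Bool.and_eq_false_iff, Bool.not_eq_false',
      decide_eq_false_iff_not, decide_eq_true_eq] at h
    obtain ⟨hna, h2⟩ := h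
    rcases h2 with h2 | h2
    · exact Or.inl h2
    · by_cases hc : PySem.Str.count b "/" < PySem.Str.count a "/"
      · exact Or.inl hc
      · exact Or.inr ⟨by omega, not_lt.mp (by simpa using h2)⟩
  · intro a b c hab hbc
    rcases hab with h | ⟨h1, h2⟩ <;> rcases hbc with h' | ⟨h1', h2'⟩
    · exact Or.inl (by omega)
    · exact Or.inl (by omega)
    · exact Or.inl (by omega)
    · exact Or.inr ⟨by omega, le_trans h2 h2'⟩
  · simp

lemma pv_str_le_empty {x : String} (h : x ≤ "") : x = "" := by
  rcases lt_or_eq_of_le h with hlt | he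
  · exfalso
    have hl := String.lt_iff_toList_lt.mp hlt
    have h0 : ("" : String).toList = [] := by decide
    rw [h0] at hl
    cases hx : x.toList <;> rw [hx] at hl <;> simp at hl
  · exact he

lemma pv_cnt_empty : PySem.Str.count "" "/" = 0 := by decide

lemma pv_hasAncestor_iff (S : List String) (f : String) :
    pvHasAncestor S f = true ↔ ∃ g ∈ S, pvAnc g f := by
  constructor
  · intro h
    obtain ⟨i, hi, hc⟩ := List.any_eq_true.mp h
    rw [List.mem_range] at hi
    simp only [Bool.and_eq_true, beq_iff_eq, List.contains_iff_mem] at hc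
    obtain ⟨hget, hmem⟩ := hc
    refine ⟨String.ofList (f.toList.take i), hmem, ?_⟩
    unfold pvAnc
    rw [String.toList_ofList]
    have htake : f.toList.take (i+1) = f.toList.take i ++ ['/'] := by
      rw [List.take_add_one, hget]
      rfl
    rw [← htake]
    exact List.take_prefix _ _
  · rintro ⟨g, hg, r, hr⟩
    have hassoc : (g.toList ++ ['/']) ++ r = g.toList ++ ('/' :: r) := by simp
    rw [hassoc] at hr
    apply List.any_eq_true.mpr
    refine ⟨g.toList.length, ?_, ?_⟩
    · rw [List.mem_range, ← hr]
      simp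
    · simp only [Bool.and_eq_true, beq_iff_eq, List.contains_iff_mem]
      constructor
      · rw [← hr, List.getElem?_append_right (le_refl _)]
        simp
      · rw [← hr, List.take_left]
        simpa using hg

-- after the root "" has been kept, every later (nonempty) folder is skipped
lemma pv_fold_root : ∀ (t : List String), (∀ f ∈ t, f ≠ "") →
    t.foldl pvAbody [""] = [""] := by
  intro t
  induction t with
  | nil => intro _; rfl
  | cons f t ih =>
      intro h
      have hf : f ≠ "" := h f List.mem_cons_self
      rw [List.foldl_cons, show pvAbody [""] f = [""] by simp [pvAbody, hf]]
      exact ih (fun g hg => h g (List.mem_cons_of_mem _ hg))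

-- main loop invariant: A's fold keeps exactly the folders with no ancestor in S
lemma pv_fold_main (S : List String) (hS0 : "" ∉ S) :
    ∀ (todo kept : List String),
      (∀ k ∈ kept, k ∈ S ∧ pvKeepB S k = true) →
      (∀ f ∈ todo, f ∈ S) →
      todo.Nodup →
      (∀ f ∈ todo, f ∉ kept) →
      (∀ f ∈ todo, ∀ g ∈ S, pvKeepB S g = true → pvAnc g f → g ∈ kept ∨ g ∈ todo) →
      todo.Pairwise (fun a b => PySem.Str.count a "/" ≤ PySem.Str.count b "/") →
      todo.foldl pvAbody kept = kept ++ todo.filter (fun f => pvKeepB S f) := by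
  intro todo
  induction todo with
  | nil => intro kept _ _ _ _ _ _; simp
  | cons f t ih =>
      intro kept hkept hin hnd hnk hiv hpw
      have hfS : f ∈ S := hin f List.mem_cons_self
      have hfk : f ∉ kept := hnk f List.mem_cons_self
      have hcontk : kept.contains "" = false := by
        cases hc : kept.contains "" with
        | false => rfl
        | true => exact absurd (hkept _ (List.contains_iff_mem.mp hc)).1 hS0
      have hany : (kept.any (fun k => f == k || (k != "" && PySem.Str.startswith f (k ++ "/"))) = true)
          ↔ pvKeepB S f = false := by
        constructor
        · intro h
          obtain ⟨k, hkm, hck⟩ := List.any_eq_true.mp h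
          simp only [Bool.or_eq_true, beq_iff_eq, Bool.and_eq_true, bne_iff_ne] at hck
          rcases hck with he | ⟨hk0, hsw⟩
          · exact absurd (he ▸ hkm) hfk
          · exact (pvKeepB_false_iff S f).mpr ⟨k, (hkept k hkm).1, (pv_startswith_anc k f).mp hsw⟩
        · intro h
          obtain ⟨g, hg, hga⟩ := (pvKeepB_false_iff S f).mp h
          obtain ⟨g', hg'S, hg'k, hg'a⟩ :=
            pv_exists_min_anc S g.toList.length g f (le_refl _) hg hga
          have hgk : g' ∈ kept := by
            rcases hiv f List.mem_cons_self g' hg'S hg'k hg'a with h' | h'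
            · exact h'
            · rcases List.mem_cons.mp h' with he | hmt
              · exact absurd he (pv_anc_ne hg'a)
              · have hle := List.rel_of_pairwise_cons hpw hmt
                have := pv_anc_count hg'a
                omega
          refine List.any_eq_true.mpr ⟨g', hgk, ?_⟩
          have hg'0 : g' ≠ "" := fun he => hS0 (he ▸ hg'S)
          simp only [Bool.or_eq_true, beq_iff_eq, Bool.and_eq_true, bne_iff_ne]
          exact Or.inr ⟨hg'0, (pv_startswith_anc g' f).mpr hg'a⟩
      by_cases hkf : pvKeepB S f = true
      · have hanyf : kept.any (fun k => f == k || (k != "" && PySem.Str.startswith f (k ++ "/"))) = false := by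
          cases hq : kept.any (fun k => f == k || (k != "" && PySem.Str.startswith f (k ++ "/"))) with
          | false => rfl
          | true => rw [hany.mp hq] at hkf; exact absurd hkf (by simp)
        have hstep : pvAbody kept f = kept ++ [f] := by
          unfold pvAbody
          rw [hcontk, hanyf]
          simp
        rw [List.foldl_cons, hstep]
        rw [ih (kept ++ [f])
          (by
            intro k hk
            rcases List.mem_append.mp hk with hk | hk
            · exact hkept k hk
            · rw [List.mem_singleton.mp hk]; exact ⟨hfS, hkf⟩)
          (fun f' hf' => hin f' (List.mem_cons_of_mem _ hf'))
          (List.nodup_cons.mp hnd).2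
          (by
            intro f' hf' hmem
            rcases List.mem_append.mp hmem with hk | hk
            · exact hnk f' (List.mem_cons_of_mem _ hf') hk
            · rw [List.mem_singleton.mp hk] at hf'
              exact (List.nodup_cons.mp hnd).1 hf')
          (by
            intro f' hf' g hg hk ha
            rcases hiv f' (List.mem_cons_of_mem _ hf') g hg hk ha with h' | h'
            · exact Or.inl (List.mem_append_left _ h')
            · rcases List.mem_cons.mp h' with he | hmt
              · exact Or.inl (List.mem_append_right _ (by simp [he]))
              · exact Or.inr hmt)
          hpw.of_cons]
        rw [List.filter_cons, if_pos hkf]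
        simp
      · have hkff : pvKeepB S f = false := Bool.eq_false_iff.mpr hkf
        have hstep : pvAbody kept f = kept := by
          unfold pvAbody
          rw [hcontk, hany.mpr hkff]
          simp
        rw [List.foldl_cons, hstep]
        rw [ih kept hkept
          (fun f' hf' => hin f' (List.mem_cons_of_mem _ hf'))
          (List.nodup_cons.mp hnd).2
          (fun f' hf' => hnk f' (List.mem_cons_of_mem _ hf'))
          (by
            intro f' hf' g hg hk ha
            rcases hiv f' (List.mem_cons_of_mem _ hf') g hg hk ha with h' | h'
            · exact Or.inl h'
            · rcases List.mem_cons.mp h' with he | hmt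
              · rw [he] at hk; rw [hk] at hkff; exact absurd hkff (by simp)
              · exact Or.inr hmt)
          hpw.of_cons]
        rw [List.filter_cons, if_neg (by simp [hkff])]

-- ===== VERDICT (by name: the statement is the Claim_ definition above) =====
theorem compress_highest_folders_spec : Claim_equal_compress_highest_folders := by
  intro full_folders _
  show (PySem.List.sorted2 (PySem.Set.ofList (full_folders.map pvNorm))
          (fun x => PySem.Str.count x "/") (fun x => x)).foldl pvAbody []
      = (if (PySem.Set.ofList (full_folders.map pvNorm) : List String).contains "" then [""]
         else (PySem.List.sorted2 (PySem.Set.ofList (full_folders.map pvNorm))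
                (fun x => PySem.Str.count x "/") (fun x => x)).filter
                (fun f => !pvHasAncestor (PySem.Set.ofList (full_folders.map pvNorm)) f))
  set S : List String := PySem.Set.ofList (full_folders.map pvNorm) with hS
  set L : List String := PySem.List.sorted2 S (fun x => PySem.Str.count x "/") (fun x => x) with hL
  have hSnd : S.Nodup := PySem.Set.nodup_ofList _
  have hperm : L.Perm S := PySem.List.sorted2_perm _ _ _ _
  have hLnd : L.Nodup := hperm.nodup_iff.mpr hSnd
  have hmem : ∀ x : String, x ∈ L ↔ x ∈ S := fun x => hperm.mem_iff
  have hpairLex := pv_sorted2_pairwise S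
  rw [← hL] at hpairLex
  have hpairCnt : L.Pairwise (fun a b => PySem.Str.count a "/" ≤ PySem.Str.count b "/") :=
    hpairLex.imp (by rintro a b (h | ⟨h, _⟩) <;> omega)
  by_cases h0 : "" ∈ S
  · rw [if_pos ((PySem.Set.contains_iff S "").mpr h0)]
    obtain ⟨t, ht⟩ : ∃ t, L = "" :: t := by
      cases hLc : L with
      | nil =>
          exact absurd ((hmem "").mpr h0) (by rw [hLc]; simp)
      | cons x t =>
          by_cases hx : x = ""
          · exact ⟨t, by rw [hx]⟩
          · have hmemL : "" ∈ L := (hmem "").mpr h0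
            rw [hLc] at hmemL
            rcases List.mem_cons.mp hmemL with he | hmt
            · exact absurd he.symm hx
            · rw [hLc] at hpairLex
              rcases List.rel_of_pairwise_cons hpairLex hmt with h | ⟨_, h2⟩
              · rw [pv_cnt_empty] at h; omega
              · exact absurd (pv_str_le_empty h2) hx
    rw [ht]
    have hne : ∀ f ∈ t, f ≠ "" := by
      rw [ht] at hLnd
      intro f hf he
      subst he
      exact (List.nodup_cons.mp hLnd).1 hf
    rw [List.foldl_cons, show pvAbody [] "" = [""] by simp [pvAbody]]
    exact pv_fold_root t hne
  · rw [if_neg (fun hc => h0 ((PySem.Set.contains_iff S "").mp hc))]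
    rw [pv_fold_main S h0 L []
      (by intro k hk; simp at hk)
      (fun f hf => (hmem f).mp hf)
      hLnd
      (by intro f _ hc; simp at hc)
      (fun f _ g hg _ _ => Or.inr ((hmem g).mpr hg))
      hpairCnt]
    rw [List.nil_append]
    apply List.filter_congr
    intro f _
    cases hA : pvHasAncestor S f with
    | false =>
        simp only [Bool.not_false]
        rw [pvKeepB_iff]
        intro g hg ha
        have : pvHasAncestor S f = true := (pv_hasAncestor_iff S f).mpr ⟨g, hg, ha⟩
        rw [hA] at this
        exact absurd this (by simp)
    | true =>
        simp only [Bool.not_true]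
        rw [pvKeepB_false_iff]
        exact (pv_hasAncestor_iff S f).mp hA
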